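-- pv_equiv track=rewrite | github.com/jwj51720/Coding-Test | Problem/BruteForce/Baekjoon/1248.py | complete_check
-- ===== SOURCE A (Python) =====
-- def complete_check(sequence, MATRIX, N):
--     """해가 완성되었을 때 부호 조건을 만족하는지 확인하는 함수"""
--     for i in range(N):
--         total = 0
--         for j in range(i, N):
--             total += sequence[j]
--             # 부호 행렬의 조건을 검사
--             if MATRIX[i][j - i] == "+" and total <= 0:
--                 return False
--             elif MATRIX[i][j - i] == "-" and total >= 0:
--                 return False
--             elif MATRIX[i][j - i] == "0" and total != 0:
--                 return False
--     return True
-- ===== SOURCE B (Python) =====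
-- def complete_check(sequence, MATRIX, N):
--     """해가 완성되었을 때 부호 조건을 만족하는지 확인하는 함수"""
--     P = [0]
--     for x in sequence[:N]:
--         P.append(P[-1] + x)
--
--     def ok(i, j):
--         s = MATRIX[i][j - i]
--         d = P[j + 1] - P[i]
--         if s == "+":
--             return d > 0
--         if s == "-":
--             return d < 0
--         if s == "0":
--             return d == 0
--         return True
--
--     return all(ok(i, j) for i in range(N) for j in range(i, N))
-- ===== Notes on version B (the rewrite author's own statement) =====
-- stated objective: alternative
-- what changed: Replaces the incremental running total of the nested loops by a prefix-sum table built once up front, and expresses the verification as a single all(...) over (i,j) pairs using P[j+1]-P[i] with a sign-test helper.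
-- outside the precondition, e.g. on complete_check([1], [['-', '-']], 2): A returns False, B returns False; on complete_check([1, 2], [['0']], 2): A returns False, B returns False
import Mathlib
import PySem

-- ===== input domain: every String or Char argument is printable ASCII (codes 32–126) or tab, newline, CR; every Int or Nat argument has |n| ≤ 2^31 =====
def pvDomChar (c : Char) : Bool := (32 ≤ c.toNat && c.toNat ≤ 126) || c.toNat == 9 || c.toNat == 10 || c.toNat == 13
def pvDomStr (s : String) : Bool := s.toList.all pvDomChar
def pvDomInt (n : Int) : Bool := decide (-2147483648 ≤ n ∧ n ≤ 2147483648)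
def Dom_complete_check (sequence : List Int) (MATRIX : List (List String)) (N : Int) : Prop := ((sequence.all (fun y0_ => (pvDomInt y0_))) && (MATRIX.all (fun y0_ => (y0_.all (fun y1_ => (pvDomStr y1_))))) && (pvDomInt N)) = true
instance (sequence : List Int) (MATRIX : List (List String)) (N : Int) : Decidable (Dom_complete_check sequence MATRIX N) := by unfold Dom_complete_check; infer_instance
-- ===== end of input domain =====

-- B replaces A's incremental running total by a prefix-sum table built once, then checks every
-- constraint with one all(...) over (i,j) pairs; same asymptotic cost, different decomposition.

-- ===== PORT A =====
-- sequence[j] / MATRIX[i] / MATRIX[i][j-i]: Python raises IndexError when out of range;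
-- the defaults below are never reached under Pre_complete_check.
def pvGetI (xs : List Int) (i : Int) : Int := (PySem.List.pyGet? xs i).getD 0
def pvGetRow (m : List (List String)) (i : Int) : List String := (PySem.List.pyGet? m i).getD []
def pvGetS (xs : List String) (i : Int) : String := (PySem.List.pyGet? xs i).getD ""

-- inner 'for j in range(i, N)' loop with early 'return False' (false = early return, true = loop finished)
def ccA_inner (sequence : List Int) (MATRIX : List (List String)) (i : Int) : List Int → Int → Bool
  | [], _ => true
  | j :: js, total =>
    let total := total + pvGetI sequence j
    if pvGetS (pvGetRow MATRIX i) (j - i) = "+" ∧ total ≤ 0 then false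
    else if pvGetS (pvGetRow MATRIX i) (j - i) = "-" ∧ total ≥ 0 then false
    else if pvGetS (pvGetRow MATRIX i) (j - i) = "0" ∧ total ≠ 0 then false
    else ccA_inner sequence MATRIX i js total

-- outer 'for i in range(N)' loop
def ccA_outer (sequence : List Int) (MATRIX : List (List String)) (N : Int) : List Int → Bool
  | [] => true
  | i :: is =>
    if ccA_inner sequence MATRIX i (PySem.List.pyRange i N 1) 0 then
      ccA_outer sequence MATRIX N is
    else false

def complete_check (sequence : List Int) (MATRIX : List (List String)) (N : Int) : Bool :=
  ccA_outer sequence MATRIX N (PySem.List.pyRange 0 N 1)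

-- ===== PORT B =====
-- helper ok(i, j) of Source B
def ccB_ok (MATRIX : List (List String)) (P : List Int) (i j : Int) : Bool :=
  let s := pvGetS (pvGetRow MATRIX i) (j - i)
  let d := pvGetI P (j + 1) - pvGetI P i
  if s = "+" then d > 0
  else if s = "-" then d < 0
  else if s = "0" then d = 0
  else true

-- P = [0]; for x in sequence[:N]: P.append(P[-1] + x)
def ccB_prefix (xs : List Int) : List Int :=
  xs.foldl (fun P x => P ++ [(P.getLast?.getD 0) + x]) [0]

def complete_check_alt (sequence : List Int) (MATRIX : List (List String)) (N : Int) : Bool :=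
  let P := ccB_prefix (PySem.List.slice sequence none (some N))
  (((PySem.List.pyRange 0 N 1).flatMap
      (fun i => (PySem.List.pyRange i N 1).map (fun j => (i, j)))).all
    (fun ij => ccB_ok MATRIX P ij.1 ij.2))

-- ===== PRECONDITION & SPEC =====
-- Pre_ = the shape a Baekjoon-1248 instance has: N entries of sequence and a triangular sign matrix
-- with N - i entries in row i.  It excludes inputs where an access sequence[j] / MATRIX[i][j-i]
-- is out of range and A raises IndexError; on a few malformed shapes A still happens to return
-- False before reaching the missing entry (so does B) — those are excluded with the rest.
def Pre_complete_check (sequence : List Int) (MATRIX : List (List String)) (N : Int) : Prop :=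
  N ≤ (sequence.length : Int) ∧ N ≤ (MATRIX.length : Int) ∧
  ∀ i < MATRIX.length, N - (i : Int) ≤ ((MATRIX.getD i []).length : Int)
instance (sequence : List Int) (MATRIX : List (List String)) (N : Int) : Decidable (Pre_complete_check sequence MATRIX N) := by unfold Pre_complete_check; infer_instance

def pvWitness_complete_check : List Int × List (List String) × Int :=
  ([2, -1, 1], [["+", "+", "+"], ["-", "0"], ["+"]], 3)

def Spec_complete_check (sequence : List Int) (MATRIX : List (List String)) (N : Int) (out : Bool) : Prop := out = complete_check_alt sequence MATRIX N
instance (sequence : List Int) (MATRIX : List (List String)) (N : Int) (out : Bool) : Decidable (Spec_complete_check sequence MATRIX N out) := by unfold Spec_complete_check; infer_instance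

-- ===== CLAIM (what is proved, stated in full; the proofs are below) =====
def Claim_equal_complete_check : Prop := ∀ (sequence : List Int) (MATRIX : List (List String)) (N : Int), Dom_complete_check sequence MATRIX N → Pre_complete_check sequence MATRIX N → Spec_complete_check sequence MATRIX N (complete_check sequence MATRIX N)

-- ===== LEMMAS AND PROOFS =====

-- running-state characterisation of Source B's prefix loop
def ccScan (a : Int) : List Int → List Int
  | [] => [a]
  | x :: xs => a :: ccScan (a + x) xs

theorem ccScan_getD (xs : List Int) : ∀ (a : Int) (k : Nat), k ≤ xs.length →
    (ccScan a xs).getD k 0 = a + (xs.take k).sum := by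
  induction xs with
  | nil =>
    intro a k hk
    have hk0 : k = 0 := Nat.le_zero.mp hk
    subst hk0
    simp [ccScan]
  | cons x xs ih =>
    intro a k hk
    cases k with
    | zero => simp [ccScan]
    | succ k =>
      simp only [ccScan, List.getD_cons_succ, List.take_succ_cons, List.sum_cons]
      rw [ih (a + x) k (by simpa using hk)]
      ring

theorem ccB_prefix_fold (xs : List Int) : ∀ (acc : List Int) (a : Int),
    xs.foldl (fun P x => P ++ [(P.getLast?.getD 0) + x]) (acc ++ [a]) = acc ++ ccScan a xs := by
  induction xs with
  | nil => intro acc a; rfl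
  | cons x xs ih =>
    intro acc a
    simp only [List.foldl_cons]
    have h1 : (acc ++ [a]).getLast?.getD 0 = a := by simp
    rw [h1, ih (acc ++ [a]) (a + x)]
    simp [ccScan]

theorem ccB_prefix_eq (xs : List Int) : ccB_prefix xs = ccScan 0 xs := by
  have := ccB_prefix_fold xs [] 0
  simpa [ccB_prefix] using this

theorem pvGetI_natCast (P : List Int) (k : Nat) : pvGetI P (k : Int) = P.getD k 0 := by
  simp [pvGetI, PySem.List.pyGet?_natCast, List.getD_eq_getElem?_getD]

theorem all_congr_mem' {α : Type} (l : List α) (f g : α → Bool)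
    (h : ∀ x ∈ l, f x = g x) : l.all f = l.all g := by
  induction l with
  | nil => rfl
  | cons x xs ih =>
    simp only [List.all_cons]
    rw [h x (by simp), ih (fun y hy => h y (by simp [hy]))]

theorem all_flatMap' {α β : Type} (l : List α) (f : α → List β) (p : β → Bool) :
    (l.flatMap f).all p = l.all (fun a => (f a).all p) := by
  induction l with
  | nil => rfl
  | cons x xs ih => simp [List.flatMap_cons, List.all_append, ih]

theorem pyRange_one_nil {a b : Int} (h : b ≤ a) : PySem.List.pyRange a b 1 = [] := by
  rw [PySem.List.pyRange_one]
  have : (b - a).toNat = 0 := by omega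
  simp [this]

-- A's three early-return branches collapse to B's single sign test
theorem branch_eq (m : String) (d : Int) (r : Bool) :
    (if m = "+" ∧ d ≤ 0 then false
     else if m = "-" ∧ d ≥ 0 then false
     else if m = "0" ∧ d ≠ 0 then false
     else r)
    = ((if m = "+" then decide (d > 0)
        else if m = "-" then decide (d < 0)
        else if m = "0" then decide (d = 0)
        else true) && r) := by
  by_cases h1 : m = "+" <;> by_cases h3 : m = "-" <;> by_cases h5 : m = "0" <;>
    split_ifs <;> simp_all

theorem ccB_ok_eq (MATRIX : List (List String)) (P : List Int) (i j : Int) :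
    ccB_ok MATRIX P i j
    = (if pvGetS (pvGetRow MATRIX i) (j - i) = "+" then decide (pvGetI P (j + 1) - pvGetI P i > 0)
       else if pvGetS (pvGetRow MATRIX i) (j - i) = "-" then decide (pvGetI P (j + 1) - pvGetI P i < 0)
       else if pvGetS (pvGetRow MATRIX i) (j - i) = "0" then decide (pvGetI P (j + 1) - pvGetI P i = 0)
       else true) := rfl

-- the key invariant: running total of A's inner loop = prefix-sum difference of B
theorem inner_eq (seq : List Int) (MATRIX : List (List String)) (N : Int)
    (hN : N ≤ (seq.length : Int)) (hN0 : 0 ≤ N)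
    (P : List Int) (hP : P = ccScan 0 (seq.take N.toNat)) (i : Int) (hi : 0 ≤ i) :
    ∀ (n : Nat) (j : Int), i ≤ j → j ≤ N → (N - j).toNat = n →
    ccA_inner seq MATRIX i (PySem.List.pyRange j N 1) (pvGetI P j - pvGetI P i)
      = (PySem.List.pyRange j N 1).all (fun j' => ccB_ok MATRIX P i j') := by
  intro n
  induction n with
  | zero =>
    intro j hij hjN h0
    have hje : N ≤ j := by omega
    rw [pyRange_one_nil hje]
    rfl
  | succ n ih =>
    intro j hij hjN hn
    have hjN' : j < N := by omega
    rw [PySem.List.pyRange_one_cons hjN']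
    have hjlen : j.toNat < seq.length := by omega
    have hseqj : pvGetI seq j = seq[j.toNat] := by
      have hj' : j = ((j.toNat : Nat) : Int) := by omega
      rw [pvGetI]
      conv_lhs => rw [hj', PySem.List.pyGet?_natCast]
      simp [List.getElem?_eq_getElem hjlen]
    have htlen : (seq.take N.toNat).length = N.toNat := by simp; omega
    have gg : ∀ k : Nat, k ≤ N.toNat → pvGetI P (k : Int) = ((seq.take N.toNat).take k).sum := by
      intro k hk
      rw [pvGetI_natCast, hP, ccScan_getD _ _ _ (by omega)]
      ring
    have hjt : j.toNat < (seq.take N.toNat).length := by omega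
    have e1 : pvGetI P j = ((seq.take N.toNat).take j.toNat).sum := by
      have h := gg j.toNat (by omega)
      rwa [show ((j.toNat : Nat) : Int) = j by omega] at h
    have e2 : pvGetI P (j + 1) = ((seq.take N.toNat).take (j.toNat + 1)).sum := by
      have h := gg (j.toNat + 1) (by omega)
      rwa [show (((j.toNat + 1 : Nat)) : Int) = j + 1 by omega] at h
    have hstep : pvGetI P j - pvGetI P i + pvGetI seq j = pvGetI P (j + 1) - pvGetI P i := by
      rw [hseqj, e1, e2, List.sum_take_succ _ _ hjt, List.getElem_take]
      ring
    simp only [ccA_inner, List.all_cons]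
    rw [hstep, branch_eq, ih (j + 1) (by omega) (by omega) (by omega), ccB_ok_eq]

theorem outer_all (seq : List Int) (MATRIX : List (List String)) (N : Int) :
    ∀ is : List Int, ccA_outer seq MATRIX N is
      = is.all (fun i => ccA_inner seq MATRIX i (PySem.List.pyRange i N 1) 0) := by
  intro is
  induction is with
  | nil => rfl
  | cons i is ih =>
    simp only [ccA_outer, List.all_cons, ih]
    by_cases h : ccA_inner seq MATRIX i (PySem.List.pyRange i N 1) 0 <;> simp [h]

-- ===== VERDICT (by name: the statement is the Claim_ definition above) =====
theorem complete_check_spec : Claim_equal_complete_check := by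
  intro seq MATRIX N _ hPre
  unfold Spec_complete_check
  obtain ⟨hN, -, -⟩ := hPre
  unfold complete_check complete_check_alt
  rw [all_flatMap', outer_all]
  by_cases hN0 : 0 ≤ N
  · rw [PySem.List.slice_to _ hN0, ccB_prefix_eq]
    apply all_congr_mem'
    intro i hi
    rw [PySem.List.mem_pyRange_one] at hi
    rw [List.all_map]
    have hkey := inner_eq seq MATRIX N hN hN0 _ rfl i hi.1 (N - i).toNat i le_rfl (by omega) rfl
    conv_lhs => rw [show (0 : Int) = pvGetI (ccScan 0 (seq.take N.toNat)) i
      - pvGetI (ccScan 0 (seq.take N.toNat)) i from by ring]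
    rw [hkey]
    apply all_congr_mem'
    intro j hj
    simp
  · rw [pyRange_one_nil (by omega)]
    rfl
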